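-- pv_equiv track=rewrite | github.com/joshuasundance-swca/paper-chaser-mcp | paper_chaser_mcp/dispatch.py | _guided_trust_summary
-- ===== SOURCE A (Python) =====
-- from typing import Any, Callable, cast
--
-- def _guided_trust_summary(sources: list[dict[str, Any]], evidence_gaps: list[str]) -> dict[str, Any]:
--     return {
--         "verifiedSourceCount": sum(
--             1
--             for source in sources
--             if source.get("verificationStatus") in {"verified_primary_source", "verified_metadata"}
--         ),
--         "onTopicSourceCount": sum(1 for source in sources if source.get("topicalRelevance") == "on_topic"),
--         "weakMatchCount": sum(1 for source in sources if source.get("topicalRelevance") == "weak_match"),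
--         "offTopicCount": sum(1 for source in sources if source.get("topicalRelevance") == "off_topic"),
--         "evidenceGapCount": len(evidence_gaps),
--     }
-- ===== SOURCE B (Python) =====
-- def _guided_trust_summary(sources, evidence_gaps):
--     verified = on_topic = weak = off = 0
--     for source in sources:
--         if source.get("verificationStatus") in {"verified_primary_source", "verified_metadata"}:
--             verified += 1
--         rel = source.get("topicalRelevance")
--         if rel == "on_topic":
--             on_topic += 1
--         elif rel == "weak_match":
--             weak += 1
--         elif rel == "off_topic":
--             off += 1
--     return {
--         "verifiedSourceCount": verified,
--         "onTopicSourceCount": on_topic,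
--         "weakMatchCount": weak,
--         "offTopicCount": off,
--         "evidenceGapCount": len(evidence_gaps),
--     }
-- ===== Notes on version B (the rewrite author's own statement) =====
-- stated objective: alternative
-- what changed: replaces A's four independent generator-sum scans over sources with one explicit loop maintaining four integer accumulators (single traversal)
import Mathlib
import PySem

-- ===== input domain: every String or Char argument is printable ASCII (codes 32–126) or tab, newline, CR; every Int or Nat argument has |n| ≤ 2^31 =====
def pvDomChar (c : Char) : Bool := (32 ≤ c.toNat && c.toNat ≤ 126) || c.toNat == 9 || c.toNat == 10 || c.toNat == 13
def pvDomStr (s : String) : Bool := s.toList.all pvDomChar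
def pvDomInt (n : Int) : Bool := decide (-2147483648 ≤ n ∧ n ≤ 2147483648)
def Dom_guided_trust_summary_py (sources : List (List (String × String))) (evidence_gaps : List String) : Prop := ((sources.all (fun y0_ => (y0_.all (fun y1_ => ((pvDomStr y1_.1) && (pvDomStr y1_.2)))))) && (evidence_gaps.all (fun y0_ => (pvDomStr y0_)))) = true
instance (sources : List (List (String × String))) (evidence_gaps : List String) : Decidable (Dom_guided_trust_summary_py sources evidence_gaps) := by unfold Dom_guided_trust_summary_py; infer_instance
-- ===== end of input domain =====

-- B replaces A's four independent generator-sum scans over `sources` with one explicit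
-- loop maintaining four integer accumulators (alternative decomposition, same cost).

-- ===== PORT A =====
-- source.get(k): first match in the association list, None if absent (dicts have unique keys,
-- so first match is exact)
def srcGet (source : List (String × String)) (k : String) : Option String :=
  (source.find? (fun p => p.1 == k)).map (·.2)

def guided_trust_summary_py (sources : List (List (String × String))) (evidence_gaps : List String) : List (String × Int) :=
  [ ("verifiedSourceCount",
      ((sources.filter (fun source =>
          srcGet source "verificationStatus" == some "verified_primary_source" ||
          srcGet source "verificationStatus" == some "verified_metadata")).map (fun _ => (1:Int))).sum),
    ("onTopicSourceCount",
      ((sources.filter (fun source => srcGet source "topicalRelevance" == some "on_topic")).map (fun _ => (1:Int))).sum),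
    ("weakMatchCount",
      ((sources.filter (fun source => srcGet source "topicalRelevance" == some "weak_match")).map (fun _ => (1:Int))).sum),
    ("offTopicCount",
      ((sources.filter (fun source => srcGet source "topicalRelevance" == some "off_topic")).map (fun _ => (1:Int))).sum),
    ("evidenceGapCount", (evidence_gaps.length : Int)) ]

-- ===== PORT B =====
-- one pass: step updates the four accumulators for a single source
def altStep (acc : Int × Int × Int × Int) (source : List (String × String)) : Int × Int × Int × Int :=
  let acc :=
    if srcGet source "verificationStatus" == some "verified_primary_source" ||
       srcGet source "verificationStatus" == some "verified_metadata"
    then (acc.1 + 1, acc.2) else acc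
  let rel := srcGet source "topicalRelevance"
  if rel == some "on_topic" then (acc.1, acc.2.1 + 1, acc.2.2)
  else if rel == some "weak_match" then (acc.1, acc.2.1, acc.2.2.1 + 1, acc.2.2.2)
  else if rel == some "off_topic" then (acc.1, acc.2.1, acc.2.2.1, acc.2.2.2 + 1)
  else acc

def guided_trust_summary_py_alt (sources : List (List (String × String))) (evidence_gaps : List String) : List (String × Int) :=
  let acc := sources.foldl altStep (0, 0, 0, 0)
  [ ("verifiedSourceCount", acc.1),
    ("onTopicSourceCount", acc.2.1),
    ("weakMatchCount", acc.2.2.1),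
    ("offTopicCount", acc.2.2.2),
    ("evidenceGapCount", (evidence_gaps.length : Int)) ]

-- ===== PRECONDITION & SPEC =====
def Spec_guided_trust_summary_py (sources : List (List (String × String))) (evidence_gaps : List String) (out : List (String × Int)) : Prop := out = guided_trust_summary_py_alt sources evidence_gaps
instance (sources : List (List (String × String))) (evidence_gaps : List String) (out : List (String × Int)) : Decidable (Spec_guided_trust_summary_py sources evidence_gaps out) := by unfold Spec_guided_trust_summary_py; infer_instance

-- ===== CLAIM (what is proved, stated in full; the proofs are below) =====
def Claim_equal_guided_trust_summary_py : Prop := ∀ (sources : List (List (String × String))) (evidence_gaps : List String), Dom_guided_trust_summary_py sources evidence_gaps → Spec_guided_trust_summary_py sources evidence_gaps (guided_trust_summary_py sources evidence_gaps)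

-- ===== LEMMAS AND PROOFS =====

-- the single-pass fold computes the four counts on top of any starting accumulator
lemma foldl_altStep (l : List (List (String × String))) (v o w f : Int) :
    l.foldl altStep (v, o, w, f) =
      (v + (l.countP (fun source =>
              srcGet source "verificationStatus" == some "verified_primary_source" ||
              srcGet source "verificationStatus" == some "verified_metadata") : Int),
       o + (l.countP (fun source => srcGet source "topicalRelevance" == some "on_topic") : Int),
       w + (l.countP (fun source => srcGet source "topicalRelevance" == some "weak_match") : Int),
       f + (l.countP (fun source => srcGet source "topicalRelevance" == some "off_topic") : Int)) := by
  induction l generalizing v o w f with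
  | nil => simp
  | cons x xs ih =>
    simp only [List.foldl_cons, List.countP_cons]
    rw [show List.foldl altStep (altStep (v, o, w, f) x) xs =
          List.foldl altStep ((altStep (v, o, w, f) x).1,
            (altStep (v, o, w, f) x).2.1,
            (altStep (v, o, w, f) x).2.2.1,
            (altStep (v, o, w, f) x).2.2.2) xs from rfl, ih]
    unfold altStep
    split_ifs <;> simp_all <;> omega

-- ===== VERDICT (by name: the statement is the Claim_ definition above) =====
theorem guided_trust_summary_py_spec : Claim_equal_guided_trust_summary_py := by
  intro sources evidence_gaps _
  unfold Spec_guided_trust_summary_py guided_trust_summary_py guided_trust_summary_py_alt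
  rw [foldl_altStep]
  simp [List.map_const', List.sum_replicate, List.countP_eq_length_filter]
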